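-- pv_equiv track=rewrite | github.com/adarsh0raj/apache-spark-project | q1.py | f
-- ===== SOURCE A (Python) =====
-- def f(row):
--     temp = []
--     for i in range(1,len(row)):
--         if row[i] != '':
--             for j in range(i+1,len(row)):
--                 if row[j] != '':
--                     temp.append((row[i], row[j]))
--     return temp
-- ===== SOURCE B (Python) =====
-- def f(row):
--     items = [x for x in row[1:] if x != '']
--     out = []
--     rest = items
--     while rest:
--         x, rest = rest[0], rest[1:]
--         out += [(x, y) for y in rest]
--     return out
-- ===== Notes on version B (the rewrite author's own statement) =====
-- stated objective: simpler
-- what changed: A's nested index loops over range(1,len) and range(i+1,len), each with an inline emptiness test on row[k], are replaced by one filter pass building items = non-empty elements of row[1:] and then a head/rest pairing loop over the survivors with no conditionals.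
import Mathlib
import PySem

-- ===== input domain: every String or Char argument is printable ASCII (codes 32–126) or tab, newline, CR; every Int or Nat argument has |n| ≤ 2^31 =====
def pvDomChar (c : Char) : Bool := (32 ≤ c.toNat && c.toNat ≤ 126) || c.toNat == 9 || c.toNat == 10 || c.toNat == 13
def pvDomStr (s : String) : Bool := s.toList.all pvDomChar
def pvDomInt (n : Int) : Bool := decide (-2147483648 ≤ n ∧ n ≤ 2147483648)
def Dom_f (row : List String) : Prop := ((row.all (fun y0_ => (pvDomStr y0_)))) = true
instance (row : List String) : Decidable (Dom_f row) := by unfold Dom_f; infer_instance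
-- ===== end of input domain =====

-- B replaces A's nested index loops (with an emptiness test inside each) by one filter pass
-- over row[1:] followed by a head/rest pairing loop over the survivors (objective: simpler).

-- ===== PORT A =====
-- indices i, j always lie in range, so pyGetD with default "" is exact here
def f (row : List String) : List (String × String) :=
  (PySem.List.pyRange 1 (PySem.List.len row) 1).foldl (fun temp i =>
    if PySem.List.pyGetD row i "" ≠ "" then
      (PySem.List.pyRange (i + 1) (PySem.List.len row) 1).foldl (fun t j =>
        if PySem.List.pyGetD row j "" ≠ "" then
          t ++ [(PySem.List.pyGetD row i "", PySem.List.pyGetD row j "")]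
        else t) temp
    else temp) []

-- ===== PORT B =====
-- the 'while rest: x, rest = rest[0], rest[1:]; out += [(x,y) for y in rest]' loop of Source B
def pairsAcc : List String → List (String × String) → List (String × String)
  | [], out => out
  | x :: rest, out => pairsAcc rest (out ++ rest.map (fun y => (x, y)))

def f_alt (row : List String) : List (String × String) :=
  pairsAcc ((PySem.List.slice row (some 1) none).filter (fun x => x ≠ "")) []

-- ===== PRECONDITION & SPEC =====
def Spec_f (row : List String) (out : List (String × String)) : Prop := out = f_alt row
instance (row : List String) (out : List (String × String)) : Decidable (Spec_f row out) := by unfold Spec_f; infer_instance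

-- ===== CLAIM (what is proved, stated in full; the proofs are below) =====
def Claim_equal_f : Prop := ∀ (row : List String), Dom_f row → Spec_f row (f row)

-- ===== LEMMAS AND PROOFS =====

-- A's outer loop from index a onwards equals pairsAcc on the filtered suffix row[a:]
theorem outer_loop (row : List String) (n : Nat) :
    ∀ (a : Int) (acc : List (String × String)), 1 ≤ a →
      ((row.length : Int) - a).toNat = n →
      (PySem.List.pyRange a (PySem.List.len row) 1).foldl (fun temp i =>
        if PySem.List.pyGetD row i "" ≠ "" then
          (PySem.List.pyRange (i + 1) (PySem.List.len row) 1).foldl (fun t j =>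
            if PySem.List.pyGetD row j "" ≠ "" then
              t ++ [(PySem.List.pyGetD row i "", PySem.List.pyGetD row j "")]
            else t) temp
        else temp) acc
      = pairsAcc ((row.drop a.toNat).filter (fun x => x ≠ "")) acc := by
  induction n with
  | zero =>
      intro a acc ha hn
      have hge : (row.length : Int) ≤ a := by omega
      have h1 : PySem.List.pyRange a ((row.length : Int)) 1 = [] :=
        PySem.List.pyRange_one_eq_nil hge
      have h2 : row.drop a.toNat = [] := by
        apply List.drop_eq_nil_of_le; omega
      simp only [PySem.List.len_eq]
      simp [h1, h2, pairsAcc]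
  | succ m ih =>
      intro a acc ha hn
      have hlt : a < (row.length : Int) := by omega
      have hltn : a.toNat < row.length := by omega
      have hcons : PySem.List.pyRange a (PySem.List.len row) 1
          = a :: PySem.List.pyRange (a + 1) (PySem.List.len row) 1 := by
        apply PySem.List.pyRange_one_cons; simpa using hlt
      have hget : PySem.List.pyGetD row a "" = row[a.toNat] :=
        PySem.List.pyGetD_eq_getElem row "" (i := a) (by omega) (by simpa using hlt)
      have hdrop : row.drop a.toNat = row[a.toNat] :: row.drop (a.toNat + 1) :=
        List.drop_eq_getElem_cons hltn
      have htoNat : (a + 1).toNat = a.toNat + 1 := by omega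
      rw [hcons, List.foldl_cons]
      by_cases hx : row[a.toNat] = ""
      · -- row[i] empty: step is a no-op
        rw [if_neg (by simp [hget, hx])]
        rw [ih (a + 1) acc (by omega) (by omega)]
        rw [hdrop, htoNat]
        simp [hx]
      · rw [if_pos (by simp [hget, hx])]
        -- inner loop: fold over indices j becomes fold over the suffix row[a+1:]
        have hinner :
            (PySem.List.pyRange (a + 1) (PySem.List.len row) 1).foldl (fun t j =>
              if PySem.List.pyGetD row j "" ≠ "" then
                t ++ [(PySem.List.pyGetD row a "", PySem.List.pyGetD row j "")]
              else t) acc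
            = acc ++ ((row.drop (a.toNat + 1)).filter (fun y => y ≠ "")).map
                (fun y => (row[a.toNat], y)) := by
          have h1 := PySem.List.foldl_pyRange_pyGetD' row ""
            (fun (t : List (String × String)) (y : String) =>
              if y ≠ "" then t ++ [(PySem.List.pyGetD row a "", y)] else t) acc (a := a + 1) (by omega)
          simp only [PySem.List.len_eq] at h1 ⊢
          rw [h1, htoNat, hget]
          exact PySem.List.foldl_append_ite _ _ _ _
        rw [hinner, ih (a + 1) _ (by omega) (by omega)]
        rw [hdrop, htoNat, List.filter_cons]
        simp [hx, pairsAcc]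

-- ===== VERDICT (by name: the statement is the Claim_ definition above) =====
theorem f_spec : Claim_equal_f := by
  intro row _
  unfold Spec_f f f_alt
  rw [outer_loop row ((row.length : Int) - 1).toNat 1 [] le_rfl rfl]
  rw [PySem.List.slice_from_one, ← List.drop_one]
  norm_num
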